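-- pv_equiv track=rewrite | github.com/iankona/freecell | freecell/newgame.py | xGame
-- ===== SOURCE A (Python) =====
-- def xGame(no):
--     board_data = [0 for i in range(52)]
--     wLeft=52
--     holdrand = no
--     a = 214013
--     b = 2531011
--     deck = [0 for i in range(52)]
--     for i in range(0,52):
--         deck[i] = i
--     card = [[0 for i in range(21)] for j in range(9)]
--     for col in range(0,9):
--         for pos in range(0,21):
--             card[col][pos] = -1
--     for i in range(0,52):
--         holdrand   =   holdrand   *   a   +   b
--         j = ((holdrand   >>   16)   &   0x7fff)%wLeft
--         card[(i % 8) + 1][ i // 8] = deck[j]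
--         wLeft -= 1
--         deck[j] = deck[wLeft]
--     for i in range(0,52):
--         board_data[i] = card[(i % 8) + 1][ i // 8]
--     return board_data
-- ===== SOURCE B (Python) =====
-- def xGame(no):
--     # Phase 1: the raw LCG draw indices, no deck at all.
--     h = no
--     js = []
--     for left in range(52, 0, -1):
--         h = h * 214013 + 2531011
--         js.append(((h >> 16) & 0x7fff) % left)
--
--     # Phase 2: resolve each draw by chasing the replacement chain backwards.
--     # The card at deck position p just before draw t: the most recent earlier draw u
--     # that vacated position p (js[u] == p) refilled it with whatever sat at position
--     # 51 - u just before draw u; if no such draw exists the position still holds card p.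
--     def value(p, t):
--         for u in range(t - 1, -1, -1):
--             if js[u] == p:
--                 return value(51 - u, u)
--         return p
--
--     return [value(js[i], i) for i in range(52)]
-- ===== Notes on version B (the rewrite author's own statement) =====
-- stated objective: alternative
-- what changed: B never maintains a deck at all: it first records the raw LCG draw indices for the whole deal, then resolves each drawn card by a recursive backward chase through the replacement chain (the draw that last vacated a position refilled it from the then-last live position), instead of A's mutable deck with swap-remove plus a staging matrix and a read-back pass.
import Mathlib
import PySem

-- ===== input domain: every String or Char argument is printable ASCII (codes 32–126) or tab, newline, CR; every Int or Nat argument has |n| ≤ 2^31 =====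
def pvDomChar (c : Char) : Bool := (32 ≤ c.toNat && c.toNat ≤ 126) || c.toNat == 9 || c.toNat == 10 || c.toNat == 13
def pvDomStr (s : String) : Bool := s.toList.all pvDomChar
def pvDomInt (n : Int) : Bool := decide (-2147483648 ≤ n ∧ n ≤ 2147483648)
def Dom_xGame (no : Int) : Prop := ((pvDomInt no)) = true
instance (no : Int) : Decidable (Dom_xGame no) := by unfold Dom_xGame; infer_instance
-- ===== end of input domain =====

-- B keeps no deck at all: it records the 52 LCG draw indices, then resolves each drawn
-- card by chasing the replacement chain backwards (objective: alternative).

-- ===== PORT A =====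
-- A-side helper: the body of A's shuffle loop, on state (holdrand, wLeft, deck, card)
def xGameStepA (st : Int × Int × List Int × List (List Int)) (i : ℕ) :
    Int × Int × List Int × List (List Int) :=
  let h := st.1 * 214013 + 2531011
  let w := st.2.1
  let d := st.2.2.1
  let c := st.2.2.2
  let j := PySem.Int.mod (PySem.Int.band (h >>> 16) 0x7fff) w
  let c := c.set (i % 8 + 1) ((c.getD (i % 8 + 1) []).set (i / 8) (PySem.List.pyGetD d j 0))
  let w := w - 1
  let d := PySem.List.pySetD d j (PySem.List.pyGetD d w 0)
  (h, w, d, c)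

-- indices j, wLeft, (i%8)+1, i//8 are always in range, so pyGetD/getD/set compute the Python values
def xGame (no : Int) : List Int :=
  let board_data : List Int := (List.range 52).map (fun _ => (0 : Int))
  let wLeft : Int := 52
  let holdrand : Int := no
  let deck : List Int := (List.range 52).map (fun _ => (0 : Int))
  let deck : List Int := (List.range 52).foldl (fun d i => d.set i (i : Int)) deck
  let card : List (List Int) := (List.range 9).map (fun _ => (List.range 21).map (fun _ => (0 : Int)))
  let card : List (List Int) := (List.range 9).foldl (fun c col =>
      (List.range 21).foldl (fun c pos => c.set col ((c.getD col []).set pos (-1))) c) card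
  let st := (List.range 52).foldl xGameStepA (holdrand, wLeft, deck, card)
  (List.range 52).foldl
    (fun bd i => bd.set i (((st.2.2.2).getD (i % 8 + 1) []).getD (i / 8) 0)) board_data

-- ===== PORT B =====
-- B-side helper: phase 1, the list js of raw LCG draw indices (no deck involved)
def xGameJs (no : Int) : List Int :=
  ((PySem.List.pyRange 52 0 (-1)).foldl
    (fun (st : Int × List Int) left =>
      let h := st.1 * 214013 + 2531011
      (h, st.2 ++ [PySem.Int.mod (PySem.Int.band (h >>> 16) 0x7fff) left]))
    (no, ([] : List Int))).2

-- B-side helper: phase 2, value(p, t) — the scan u = t-1 … 0 checks u = t-1 first and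
-- otherwise equals the scan for t-1, which is exactly this structural recursion on t
def xGameValue (js : List Int) : Int → ℕ → Int
  | p, 0 => p
  | p, t+1 =>
    if PySem.List.pyGetD js (t : Int) 0 = p then xGameValue js (51 - (t : Int)) t
    else xGameValue js p t

def xGame_alt (no : Int) : List Int :=
  let js := xGameJs no
  (List.range 52).map (fun (i : ℕ) => xGameValue js (PySem.List.pyGetD js (i : Int) 0) i)

-- ===== PRECONDITION & SPEC =====
def Spec_xGame (no : Int) (out : List Int) : Prop := out = xGame_alt no
instance (no : Int) (out : List Int) : Decidable (Spec_xGame no out) := by unfold Spec_xGame; infer_instance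

-- ===== CLAIM (what is proved, stated in full; the proofs are below) =====
def Claim_equal_xGame : Prop := ∀ (no : Int), Dom_xGame no → Spec_xGame no (xGame no)

-- ===== LEMMAS AND PROOFS =====

def pvDeckA0 : List Int :=
  (List.range 52).foldl (fun d i => d.set i (i : Int)) ((List.range 52).map (fun _ => (0 : Int)))

def pvCardA0 : List (List Int) :=
  (List.range 9).foldl (fun c col =>
      (List.range 21).foldl (fun c pos => c.set col ((c.getD col []).set pos (-1))) c)
    ((List.range 9).map (fun _ => (List.range 21).map (fun _ => (0 : Int))))

def pvStA (no : Int) (k : ℕ) : Int × Int × List Int × List (List Int) :=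
  (List.range k).foldl xGameStepA (no, 52, pvDeckA0, pvCardA0)

-- the holdrand sequence and the per-draw index, in closed indexed form
def pvH (no : Int) : ℕ → Int
  | 0 => no
  | k + 1 => pvH no k * 214013 + 2531011

def pvJ (no : Int) (k : ℕ) : Int :=
  PySem.Int.mod (PySem.Int.band (pvH no (k + 1) >>> 16) 0x7fff) (52 - (k : Int))

def pvJL (no : Int) : List Int := (List.range 52).map (pvJ no)

def pvRead (c : List (List Int)) (i : ℕ) : Int := (c.getD (i % 8 + 1) []).getD (i / 8) 0

lemma pvXGame_eq (no : Int) :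
    xGame no = (List.range 52).foldl
      (fun bd i => bd.set i (pvRead (pvStA no 52).2.2.2 i))
      ((List.range 52).map (fun _ => (0 : Int))) := by
  simp only [xGame, pvRead, pvStA, pvDeckA0, pvCardA0]

lemma pvStA_succ (no : Int) (k : ℕ) : pvStA no (k + 1) = xGameStepA (pvStA no k) k := by
  simp [pvStA, List.range_succ]

lemma pvJs_eq (no : Int) : xGameJs no = pvJL no := by
  have key : ∀ n : ℕ,
      (List.range n).foldl
        (fun (st : Int × List Int) (k : ℕ) =>
          let h := st.1 * 214013 + 2531011
          (h, st.2 ++ [PySem.Int.mod (PySem.Int.band (h >>> 16) 0x7fff) ((52 : Int) - (k : ℕ))]))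
        (no, ([] : List Int))
      = (pvH no n, (List.range n).map (pvJ no)) := by
    intro n
    induction n with
    | zero => simp [pvH]
    | succ n ih =>
      rw [List.range_succ, List.foldl_append, ih]
      simp [pvH, pvJ]
  simp only [xGameJs, PySem.List.pyRange_neg_one]
  have h52 : ((52 : Int) - 0).toNat = 52 := rfl
  rw [h52, List.foldl_map]
  have := key 52
  simp only [pvJL]
  norm_num at this ⊢
  rw [this]

-- js[k] for k < 52
lemma pvJL_get (no : Int) (k : ℕ) (hk : k < 52) :
    PySem.List.pyGetD (pvJL no) (k : Int) 0 = pvJ no k := by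
  simp [pvJL, PySem.List.pyGetD_natCast, List.getD_eq_getElem?_getD, List.getElem?_range hk]

-- getD after set on the outer (column) list
lemma pvGetDrow (c : List (List Int)) (n m : ℕ) (r : List Int) (hn : n < c.length) :
    (c.set n r).getD m [] = if n = m then r else c.getD m [] := by
  rcases eq_or_ne n m with h | h
  · subst h
    simp [List.getD_eq_getElem?_getD, List.getElem?_set_self hn]
  · simp [h, List.getD_eq_getElem?_getD, List.getElem?_set_ne h]

-- getD after set on a list of Ints (deck or row)
lemma pvGetD0 (r : List Int) (p q : ℕ) (v : Int) (hp : p < r.length) :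
    (r.set p v).getD q 0 = if p = q then v else r.getD q 0 := by
  rcases eq_or_ne p q with h | h
  · subst h
    simp [List.getD_eq_getElem?_getD, List.getElem?_set_self hp]
  · simp [h, List.getD_eq_getElem?_getD, List.getElem?_set_ne h]

-- reading back a cell that a later draw did not touch: i ↦ (i%8+1, i/8) is injective on 0..51
lemma pvRead_set_ne (c : List (List Int)) (k i : ℕ) (hc9 : c.length = 9)
    (hrow : (c.getD (k % 8 + 1) []).length = 21) (hik : i ≠ k) (_hi : i < 52)
    (hk : k < 52) (v : Int) :
    pvRead (c.set (k % 8 + 1) ((c.getD (k % 8 + 1) []).set (k / 8) v)) i = pvRead c i := by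
  unfold pvRead
  rw [pvGetDrow _ _ _ _ (by omega)]
  by_cases hcol : k % 8 + 1 = i % 8 + 1
  · rw [if_pos hcol, pvGetD0 _ _ _ _ (by omega), if_neg (by omega), hcol]
  · rw [if_neg hcol]

-- reading back the cell the draw just wrote
lemma pvRead_set_self (c : List (List Int)) (k : ℕ) (hk : k < 52) (hc9 : c.length = 9)
    (hrow : (c.getD (k % 8 + 1) []).length = 21) (v : Int) :
    pvRead (c.set (k % 8 + 1) ((c.getD (k % 8 + 1) []).set (k / 8) v)) k = v := by
  unfold pvRead
  rw [pvGetDrow _ _ _ _ (by omega), if_pos rfl, pvGetD0 _ _ _ _ (by omega), if_pos rfl]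

-- the invariant: A's deck at step k holds, at each live position p, exactly B's value(p, k)
set_option maxRecDepth 4000 in
lemma pvInv (no : Int) : ∀ k, k ≤ 52 →
    (pvStA no k).1 = pvH no k ∧
    (pvStA no k).2.1 = 52 - (k : Int) ∧
    (pvStA no k).2.2.1.length = 52 ∧
    (∀ p : ℕ, p < 52 - k → (pvStA no k).2.2.1.getD p 0 = xGameValue (pvJL no) (p : Int) k) ∧
    ((pvStA no k).2.2.2.length = 9 ∧ ∀ r ∈ (pvStA no k).2.2.2, r.length = 21) ∧
    (∀ i, i < k → pvRead (pvStA no k).2.2.2 i = xGameValue (pvJL no) (pvJ no i) i) := by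
  intro k
  induction k with
  | zero =>
    intro _
    refine ⟨rfl, ?_, ?_, ?_, ?_, by omega⟩
    · show (52 : Int) = 52 - ((0 : ℕ) : Int)
      norm_num
    · show pvDeckA0.length = 52
      decide
    · intro p hp
      show pvDeckA0.getD p 0 = xGameValue (pvJL no) (p : Int) 0
      have h : ∀ q, q < 52 → pvDeckA0.getD q 0 = (q : Int) := by decide
      exact h p (by omega)
    · show pvCardA0.length = 9 ∧ ∀ r ∈ pvCardA0, r.length = 21
      decide
  | succ k ih =>
    intro hk
    obtain ⟨hh, hw, hdl, hdeck, ⟨hc9, hc21⟩, hread⟩ := ih (by omega)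
    have hkpos : (0 : Int) < 52 - (k : Int) := by omega
    have hj0 : 0 ≤ pvJ no k := PySem.Int.mod_nonneg _ hkpos
    have hjlt : pvJ no k < 52 - (k : Int) := PySem.Int.mod_lt _ hkpos
    have hjnat : ((pvJ no k).toNat : Int) = pvJ no k := Int.toNat_of_nonneg hj0
    have hjnatlt : (pvJ no k).toNat < 52 - k := by omega
    have hrow : ((pvStA no k).2.2.2.getD (k % 8 + 1) []).length = 21 := by
      apply hc21
      rw [List.getD_eq_getElem (hn := by omega)]
      exact List.getElem_mem _
    rw [pvStA_succ]
    simp only [xGameStepA]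
    rw [hh, hw]
    have hjdef : PySem.Int.mod
        (PySem.Int.band ((pvH no k * 214013 + 2531011) >>> 16) 0x7fff) (52 - (k : Int))
        = pvJ no k := rfl
    rw [hjdef]
    -- the card drawn at step k
    have hdraw : PySem.List.pyGetD (pvStA no k).2.2.1 (pvJ no k) 0
        = xGameValue (pvJL no) (pvJ no k) k := by
      rw [PySem.List.pyGetD_of_nonneg _ _ hj0, hdeck _ hjnatlt, hjnat]
    -- the card moved into position j at step k
    have hfill : PySem.List.pyGetD (pvStA no k).2.2.1 (52 - (k : Int) - 1) 0
        = xGameValue (pvJL no) (51 - (k : Int)) k := by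
      have h1 : ((52 : Int) - (k : Int) - 1).toNat = 51 - k := by omega
      have h2 : ((51 - k : ℕ) : Int) = 51 - (k : Int) := by omega
      rw [PySem.List.pyGetD_of_nonneg _ _ (by omega), h1, hdeck _ (by omega), h2]
    refine ⟨rfl, by push_cast; omega, ?_, ?_, ?_, ?_⟩
    · rw [PySem.List.pySetD_of_nonneg _ _ hj0]
      simpa using hdl
    · -- deck invariant at k+1
      intro p hp
      rw [PySem.List.pySetD_of_nonneg _ _ hj0,
        pvGetD0 _ _ _ _ (by omega)]
      have hunf : xGameValue (pvJL no) (p : Int) (k + 1)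
          = if PySem.List.pyGetD (pvJL no) (k : Int) 0 = (p : Int)
            then xGameValue (pvJL no) (51 - (k : Int)) k
            else xGameValue (pvJL no) (p : Int) k := rfl
      rw [hunf, pvJL_get no k (by omega)]
      by_cases hpj : (pvJ no k).toNat = p
      · rw [if_pos hpj, if_pos (by omega), hfill]
      · rw [if_neg hpj, if_neg (by omega), hdeck _ (by omega)]
    · -- card shape
      constructor
      · simp [hc9]
      · intro r hr
        rcases List.mem_or_eq_of_mem_set hr with h | h
        · exact hc21 r h
        · subst h
          rw [List.length_set]
          exact hrow
    · -- card read-back invariant at k+1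
      intro i hi
      by_cases hik : i = k
      · subst hik
        rw [pvRead_set_self _ _ (by omega) hc9 hrow, hdraw]
      · rw [pvRead_set_ne _ _ _ hc9 hrow hik (by omega) (by omega)]
        exact hread i (by omega)

-- a fold of in-range writes over List.range, characterised pointwise
lemma pvFoldSet (g : ℕ → Int) (l : List Int) : ∀ n, n ≤ l.length →
    (((List.range n).foldl (fun bd i => bd.set i (g i)) l).length = l.length ∧
     ∀ m, ((List.range n).foldl (fun bd i => bd.set i (g i)) l)[m]? =
       if m < n then some (g m) else l[m]?) := by
  intro n
  induction n with
  | zero => intro _; simp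
  | succ n ih =>
    intro hn
    obtain ⟨hl, hm⟩ := ih (by omega)
    rw [List.range_succ, List.foldl_append]
    refine ⟨by simpa using hl, ?_⟩
    intro m
    simp only [List.foldl_cons, List.foldl_nil]
    by_cases h : m = n
    · subst h
      rw [List.getElem?_set_self (by omega), if_pos (by omega)]
    · rw [List.getElem?_set_ne (by omega), hm m]
      by_cases h2 : m < n
      · rw [if_pos h2, if_pos (by omega)]
      · rw [if_neg h2, if_neg (by omega)]

lemma pvXGameAlt_eq (no : Int) :
    xGame_alt no = (List.range 52).map (fun i => xGameValue (pvJL no) (pvJ no i) i) := by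
  simp only [xGame_alt, pvJs_eq]
  apply List.map_congr_left
  intro i hi
  rw [pvJL_get no i (List.mem_range.mp hi)]

-- ===== VERDICT (by name: the statement is the Claim_ definition above) =====
theorem xGame_spec : Claim_equal_xGame := by
  intro no _
  show xGame no = xGame_alt no
  rw [pvXGame_eq, pvXGameAlt_eq]
  obtain ⟨_, _, _, _, _, hread⟩ := pvInv no 52 le_rfl
  obtain ⟨hL, hE⟩ := pvFoldSet (fun i => pvRead (pvStA no 52).2.2.2 i)
    ((List.range 52).map (fun _ => (0 : Int))) 52 (by simp)
  apply List.ext_getElem?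
  intro m
  rw [hE m]
  by_cases h : m < 52
  · rw [if_pos h, hread m h, List.getElem?_map, List.getElem?_range h]
    rfl
  · rw [if_neg h, List.getElem?_eq_none (by simp; omega),
      List.getElem?_eq_none (by simp; omega)]
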